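-- pv_equiv track=rewrite | github.com/alexandraback/datacollection | solutions_5631989306621952_0/Python/Clarissa/last_word.py | find_last_word
-- ===== SOURCE A (Python) =====
-- def find_last_word(string):
--     # Finds the last word for a given string.
--     last_word = ''
--     max_ordinance_so_far = -1;
--     for letter in string:
--         # Letter is as big as the biggest seen, put in front
--         if ord(letter) >= max_ordinance_so_far:
--             max_ordinance_so_far = ord(letter)
--             last_word = letter + last_word
--         #Letter is smaller than biggest seen, put in back
--         else:
--             last_word = last_word + letter
--
--     return last_word;
-- ===== SOURCE B (Python) =====
-- def find_last_word(string):
--     # Pass 1: exclusive prefix maximum of ord-values (max of all earlier letters, -1 default).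
--     prefix = []
--     m = -1
--     for ch in string:
--         prefix.append(m)
--         m = max(m, ord(ch))
--     # Pass 2: classify each letter as a record (>= its exclusive prefix-max) or not.
--     records = [ch for ch, p in zip(string, prefix) if ord(ch) >= p]
--     nonrecords = [ch for ch, p in zip(string, prefix) if ord(ch) < p]
--     return ''.join(reversed(records)) + ''.join(nonrecords)
-- ===== Notes on version B (the rewrite author's own statement) =====
-- stated objective: faster
-- what changed: Replaces A's single interleaved scan that rebuilds the result string by per-letter prepend/append with a prefix-maximum table built in its own pass, a stateless classification of letters into records/non-records, and one final join of reversed records with non-records.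
import Mathlib
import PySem

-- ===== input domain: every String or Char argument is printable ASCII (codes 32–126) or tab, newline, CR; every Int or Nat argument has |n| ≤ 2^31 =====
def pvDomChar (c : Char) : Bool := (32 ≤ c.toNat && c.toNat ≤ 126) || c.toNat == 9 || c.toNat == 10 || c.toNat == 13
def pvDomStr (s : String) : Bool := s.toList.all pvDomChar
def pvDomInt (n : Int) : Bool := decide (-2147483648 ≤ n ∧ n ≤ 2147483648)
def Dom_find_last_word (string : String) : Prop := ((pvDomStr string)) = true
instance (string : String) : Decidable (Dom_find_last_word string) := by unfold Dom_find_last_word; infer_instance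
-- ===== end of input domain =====

-- B replaces A's single interleaved scan by a prefix-max table plus a separate
-- classification pass (alternative decomposition, same result).


-- ===== PORT A =====
-- one step of A's loop: state (last_word as List Char, max_ordinance_so_far)
def flwStepA (st : List Char × Int) (c : Char) : List Char × Int :=
  if (c.toNat : Int) ≥ st.2 then (c :: st.1, (c.toNat : Int)) else (st.1 ++ [c], st.2)

def find_last_word (string : String) : String :=
  String.mk (string.toList.foldl flwStepA ([], -1)).1

-- ===== PORT B =====
-- pass 1: exclusive prefix maxima of ord-values, starting from -1
def flwPrefix (m : Int) : List Char → List Int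
  | [] => []
  | c :: cs => m :: flwPrefix (max m (c.toNat : Int)) cs

def find_last_word_alt (string : String) : String :=
  let cs := string.toList
  let prefs := flwPrefix (-1) cs
  let records := ((cs.zip prefs).filter (fun p => (p.1.toNat : Int) ≥ p.2)).map Prod.fst
  let nonrecords := ((cs.zip prefs).filter (fun p => (p.1.toNat : Int) < p.2)).map Prod.fst
  String.mk (records.reverse ++ nonrecords)

-- ===== PRECONDITION & SPEC =====
def Spec_find_last_word (string : String) (out : String) : Prop := out = find_last_word_alt string
instance (string : String) (out : String) : Decidable (Spec_find_last_word string out) := by unfold Spec_find_last_word; infer_instance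

-- ===== CLAIM (what is proved, stated in full; the proofs are below) =====
def Claim_equal_find_last_word : Prop := ∀ (string : String), Dom_find_last_word string → Spec_find_last_word string (find_last_word string)

-- ===== LEMMAS AND PROOFS =====

def flwRecs (m : Int) (cs : List Char) : List Char :=
  ((cs.zip (flwPrefix m cs)).filter (fun p => (p.1.toNat : Int) ≥ p.2)).map Prod.fst

def flwNon (m : Int) (cs : List Char) : List Char :=
  ((cs.zip (flwPrefix m cs)).filter (fun p => (p.1.toNat : Int) < p.2)).map Prod.fst

theorem flw_invariant (cs : List Char) :
    ∀ (lw : List Char) (m : Int),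
      (cs.foldl flwStepA (lw, m)).1 = (flwRecs m cs).reverse ++ lw ++ flwNon m cs := by
  induction cs with
  | nil => intro lw m; simp [flwRecs, flwNon, flwPrefix]
  | cons c cs ih =>
    intro lw m
    by_cases h : (c.toNat : Int) ≥ m
    · have hmax : max m (c.toNat : Int) = (c.toNat : Int) := max_eq_right h
      simp only [List.foldl_cons, flwStepA, h, if_pos]
      rw [ih (c :: lw) (c.toNat : Int)]
      simp [flwRecs, flwNon, flwPrefix, hmax, h]
    · have hmax : max m (c.toNat : Int) = m := max_eq_left (le_of_lt (lt_of_not_ge h))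
      simp only [List.foldl_cons, flwStepA]
      rw [if_neg h, ih (lw ++ [c]) m]
      simp [flwRecs, flwNon, flwPrefix, hmax, lt_of_not_ge h]

-- ===== VERDICT (by name: the statement is the Claim_ definition above) =====
theorem find_last_word_spec : Claim_equal_find_last_word := by
  intro s _
  unfold Spec_find_last_word find_last_word find_last_word_alt
  rw [flw_invariant s.toList [] (-1)]
  simp [flwRecs, flwNon]
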